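-- pv_equiv track=rewrite | github.com/keithtyser/sf-dining-rag | src/scrapers/wikipedia_scraper.py | determine_subcategory
-- ===== SOURCE A (Python) =====
-- def determine_subcategory(section_title: str) -> str:
--     """Determine the subcategory based on section title."""
--     title_lower = section_title.lower()
--
--     if any(word in title_lower for word in ['history', 'origin', 'background']):
--         return 'history'
--     elif any(word in title_lower for word in ['preparation', 'cooking', 'recipe']):
--         return 'preparation'
--     elif any(word in title_lower for word in ['ingredient', 'component']):
--         return 'ingredients'
--     elif any(word in title_lower for word in ['variation', 'type', 'style']):
--         return 'variations'
--     elif any(word in title_lower for word in ['culture', 'tradition', 'custom']):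
--         return 'cultural'
--     else:
--         return 'general'
-- ===== SOURCE B (Python) =====
-- _KEYWORD_PRIORITY = {
--     'history': 0, 'origin': 0, 'background': 0,
--     'preparation': 1, 'cooking': 1, 'recipe': 1,
--     'ingredient': 2, 'component': 2,
--     'variation': 3, 'type': 3, 'style': 3,
--     'culture': 4, 'tradition': 4, 'custom': 4,
-- }
-- _NAMES = ['history', 'preparation', 'ingredients', 'variations', 'cultural', 'general']
--
-- def determine_subcategory(section_title: str) -> str:
--     """Single scan of the lowered title: at each position test keyword prefixes,
--     keeping the minimum category priority seen; index the name table with it."""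
--     best = 5
--     suffix = section_title.lower()
--     while suffix:
--         for kw, pri in _KEYWORD_PRIORITY.items():
--             if pri < best and suffix.startswith(kw):
--                 best = pri
--         suffix = suffix[1:]
--     return _NAMES[best]
-- ===== Notes on version B (the rewrite author's own statement) =====
-- stated objective: alternative
-- what changed: B makes a single left-to-right scan over the lowered title, testing at each position which keywords start there and keeping the minimum category priority in an accumulator, then indexes a name table with it - instead of A's per-category chain of substring-membership tests.
import Mathlib
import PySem

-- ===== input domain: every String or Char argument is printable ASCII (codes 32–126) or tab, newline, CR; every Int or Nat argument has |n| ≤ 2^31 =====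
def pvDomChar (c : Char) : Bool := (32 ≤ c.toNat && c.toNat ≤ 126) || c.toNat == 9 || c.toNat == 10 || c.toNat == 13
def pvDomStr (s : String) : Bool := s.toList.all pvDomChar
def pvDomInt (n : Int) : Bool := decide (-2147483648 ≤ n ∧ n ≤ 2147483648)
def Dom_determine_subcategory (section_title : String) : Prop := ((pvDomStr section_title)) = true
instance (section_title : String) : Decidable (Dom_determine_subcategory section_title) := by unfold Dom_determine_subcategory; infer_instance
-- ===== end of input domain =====

-- B replaces A's per-category substring-membership chain by a single left-to-right scan of
-- the lowered title that tests keyword prefixes at each position and keeps the minimum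
-- category priority (alternative algorithm; same asymptotic cost).

-- ===== PORT A =====
def determine_subcategory (section_title : String) : String :=
  let title_lower := PySem.Str.lower section_title
  if ["history", "origin", "background"].any (fun word => PySem.Str.isIn word title_lower) then
    "history"
  else if ["preparation", "cooking", "recipe"].any (fun word => PySem.Str.isIn word title_lower) then
    "preparation"
  else if ["ingredient", "component"].any (fun word => PySem.Str.isIn word title_lower) then
    "ingredients"
  else if ["variation", "type", "style"].any (fun word => PySem.Str.isIn word title_lower) then
    "variations"
  else if ["culture", "tradition", "custom"].any (fun word => PySem.Str.isIn word title_lower) then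
    "cultural"
  else
    "general"

-- ===== PORT B =====
-- the _KEYWORD_PRIORITY dict (insertion order) and _NAMES list of Source B
def KEYWORD_PRIORITY : List (String × Nat) :=
  [("history", 0), ("origin", 0), ("background", 0),
   ("preparation", 1), ("cooking", 1), ("recipe", 1),
   ("ingredient", 2), ("component", 2),
   ("variation", 3), ("type", 3), ("style", 3),
   ("culture", 4), ("tradition", 4), ("custom", 4)]

def NAMES : List String :=
  ["history", "preparation", "ingredients", "variations", "cultural", "general"]

-- suffix.startswith(kw)
def swKw (suffix : List Char) (kw : String) : Bool := PySem.Chars.startswith suffix kw.toList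

-- the inner 'for kw, pri in _KEYWORD_PRIORITY.items()' loop
def scanKw (suffix : List Char) (best : Nat) : Nat :=
  KEYWORD_PRIORITY.foldl (fun b kp => if kp.2 < b ∧ swKw suffix kp.1 then kp.2 else b) best

-- the outer 'while suffix: …; suffix = suffix[1:]' loop
def scanAll : List Char → Nat → Nat
  | [], best => best
  | c :: rest, best => scanAll rest (scanKw (c :: rest) best)

def determine_subcategory_alt (section_title : String) : String :=
  -- best ≤ 5 always holds, so the _NAMES[best] index is in range; getD's default is never used
  NAMES.getD (scanAll (PySem.Chars.lower section_title.toList) 5) ""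

-- ===== PRECONDITION & SPEC =====
def Spec_determine_subcategory (section_title : String) (out : String) : Prop := out = determine_subcategory_alt section_title
instance (section_title : String) (out : String) : Decidable (Spec_determine_subcategory section_title out) := by unfold Spec_determine_subcategory; infer_instance

-- ===== CLAIM (what is proved, stated in full; the proofs are below) =====
def Claim_equal_determine_subcategory : Prop := ∀ (section_title : String), Dom_determine_subcategory section_title → Spec_determine_subcategory section_title (determine_subcategory section_title)

-- ===== LEMMAS AND PROOFS =====

-- kw in t, on the list side
def inKw (kw : String) (t : List Char) : Bool := PySem.Chars.isIn kw.toList t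

-- optional minimum machinery used to characterise the two loops of B
def omin (a : Nat) : Option Nat → Nat
  | none => a
  | some p => min a p

def optMin : Option Nat → Option Nat → Option Nat
  | none, o => o
  | some p, o => some (omin p o)

-- minimum priority of a keyword that is a PREFIX of `suffix`
def bestPref (suffix : List Char) : Option Nat :=
  KEYWORD_PRIORITY.foldr
    (fun kp acc => if swKw suffix kp.1 then some (omin kp.2 acc) else acc) none

-- minimum priority of a keyword occurring anywhere in `t`
def bestAll : List Char → Option Nat
  | [] => none
  | c :: r => optMin (bestPref (c :: r)) (bestAll r)

-- per-category "some keyword starts here" / "some keyword occurs in t"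
def anyStart (suffix : List Char) (kws : List String) : Bool :=
  kws.any (fun kw => swKw suffix kw)
def anyIn (t : List Char) (kws : List String) : Bool :=
  kws.any (fun kw => inKw kw t)

def posChain (s : List Char) : Option Nat :=
  if anyStart s ["history", "origin", "background"] then some 0
  else if anyStart s ["preparation", "cooking", "recipe"] then some 1
  else if anyStart s ["ingredient", "component"] then some 2
  else if anyStart s ["variation", "type", "style"] then some 3
  else if anyStart s ["culture", "tradition", "custom"] then some 4
  else none

def chainVal (t : List Char) : Option Nat :=
  if anyIn t ["history", "origin", "background"] then some 0
  else if anyIn t ["preparation", "cooking", "recipe"] then some 1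
  else if anyIn t ["ingredient", "component"] then some 2
  else if anyIn t ["variation", "type", "style"] then some 3
  else if anyIn t ["culture", "tradition", "custom"] then some 4
  else none

theorem foldKw_eq (tbl : List (String × Nat)) (suffix : List Char) (b : Nat) :
    tbl.foldl (fun b kp => if kp.2 < b ∧ swKw suffix kp.1 then kp.2 else b) b
      = omin b (tbl.foldr (fun kp acc => if swKw suffix kp.1 then some (omin kp.2 acc) else acc) none) := by
  induction tbl generalizing b with
  | nil => rfl
  | cons kp r ih =>
    simp only [List.foldl_cons, List.foldr_cons, ih]
    by_cases hs : swKw suffix kp.1 = true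
    · simp only [hs, and_true, if_true]
      cases hF : r.foldr (fun kp acc => if swKw suffix kp.1 then some (omin kp.2 acc) else acc) none with
      | none => simp only [omin]; split <;> omega
      | some q => simp only [omin]; split <;> omega
    · simp [hs]

theorem scanKw_eq (suffix : List Char) (b : Nat) : scanKw suffix b = omin b (bestPref suffix) := by
  unfold scanKw bestPref; exact foldKw_eq KEYWORD_PRIORITY suffix b

theorem omin_omin (a : Nat) (o1 o2 : Option Nat) : omin (omin a o1) o2 = omin a (optMin o1 o2) := by
  cases o1 <;> cases o2 <;> simp [omin, optMin, Nat.min_assoc]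

theorem scanAll_eq (t : List Char) (b : Nat) : scanAll t b = omin b (bestAll t) := by
  induction t generalizing b with
  | nil => rfl
  | cons c r ih =>
    simp only [scanAll, bestAll, ih, scanKw_eq, omin_omin]

theorem group_eq (suffix : List Char) (kws : List String) (p : Nat) (acc : Option Nat)
    (hacc : ∀ q, acc = some q → p ≤ q) :
    (kws.map (fun kw => (kw, p))).foldr
        (fun kp acc => if swKw suffix kp.1 then some (omin kp.2 acc) else acc) acc
      = if anyStart suffix kws then some p else acc := by
  induction kws with
  | nil => simp [anyStart]
  | cons k ks ih =>
    simp only [List.map_cons, List.foldr_cons, ih, anyStart, List.any_cons]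
    by_cases hsw : swKw suffix k = true
    · simp only [hsw, Bool.true_or, if_true]
      by_cases han : (ks.any fun kw => swKw suffix kw) = true
      · simp [han, omin]
      · simp only [Bool.not_eq_true] at han
        simp only [han, Bool.false_eq_true, if_false]
        cases hacc' : acc with
        | none => simp [omin]
        | some q => have := hacc q hacc'; simp only [omin]; congr 1; omega
    · simp only [Bool.not_eq_true] at hsw
      simp [hsw]

theorem bestPref_eq (suffix : List Char) : bestPref suffix = posChain suffix := by
  unfold bestPref
  have htbl : KEYWORD_PRIORITY =
      (["history", "origin", "background"].map (fun kw => (kw, (0 : Nat)))) ++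
      ((["preparation", "cooking", "recipe"].map (fun kw => (kw, 1))) ++
      ((["ingredient", "component"].map (fun kw => (kw, 2))) ++
      ((["variation", "type", "style"].map (fun kw => (kw, 3))) ++
      (["culture", "tradition", "custom"].map (fun kw => (kw, 4)))))) := rfl
  rw [htbl, List.foldr_append, List.foldr_append, List.foldr_append, List.foldr_append]
  rw [group_eq suffix ["culture", "tradition", "custom"] 4 none (by intro q hq; cases hq)]
  rw [group_eq suffix ["variation", "type", "style"] 3 _
      (by intro q hq; split_ifs at hq <;> simp_all <;> omega)]
  rw [group_eq suffix ["ingredient", "component"] 2 _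
      (by intro q hq; split_ifs at hq <;> simp_all <;> omega)]
  rw [group_eq suffix ["preparation", "cooking", "recipe"] 1 _
      (by intro q hq; split_ifs at hq <;> simp_all <;> omega)]
  rw [group_eq suffix ["history", "origin", "background"] 0 _
      (by intro q _; exact Nat.zero_le q)]
  rfl

theorem inKw_cons (kw : String) (c : Char) (r : List Char) :
    inKw kw (c :: r) = (swKw (c :: r) kw || inKw kw r) := by
  unfold inKw swKw
  have h1 : PySem.Chars.isIn kw.toList (c :: r) = true ↔ ∃ j, kw.toList <+: (c :: r).drop j :=
    (PySem.Chars.exists_prefix_drop_iff_isIn kw.toList (c :: r)).symm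
  have h2 : PySem.Chars.isIn kw.toList r = true ↔ ∃ j, kw.toList <+: r.drop j :=
    (PySem.Chars.exists_prefix_drop_iff_isIn kw.toList r).symm
  have hsplit : (∃ j, kw.toList <+: (c :: r).drop j) ↔ (kw.toList <+: (c :: r) ∨ ∃ j, kw.toList <+: r.drop j) := by
    constructor
    · rintro ⟨j, hj⟩
      cases j with
      | zero => exact Or.inl hj
      | succ j => exact Or.inr ⟨j, hj⟩
    · rintro (h | ⟨j, hj⟩)
      · exact ⟨0, h⟩
      · exact ⟨j + 1, hj⟩
  rw [Bool.eq_iff_iff, Bool.or_eq_true, h1, h2, hsplit, PySem.Chars.startswith_iff]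

theorem anyIn_cons (kws : List String) (c : Char) (r : List Char) :
    anyIn (c :: r) kws = (anyStart (c :: r) kws || anyIn r kws) := by
  unfold anyIn anyStart
  induction kws with
  | nil => rfl
  | cons k ks ih =>
    simp only [List.any_cons]
    rw [inKw_cons, ih]
    cases swKw (c :: r) k <;> cases inKw k r <;> simp

theorem bestAll_eq (t : List Char) : bestAll t = chainVal t := by
  induction t with
  | nil =>
    have : chainVal [] = none := by decide
    rw [this]; rfl
  | cons c r ih =>
    rw [bestAll, bestPref_eq, ih]
    unfold posChain chainVal
    rw [anyIn_cons, anyIn_cons, anyIn_cons, anyIn_cons, anyIn_cons]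
    generalize anyStart (c :: r) ["history", "origin", "background"] = s0
    generalize anyStart (c :: r) ["preparation", "cooking", "recipe"] = s1
    generalize anyStart (c :: r) ["ingredient", "component"] = s2
    generalize anyStart (c :: r) ["variation", "type", "style"] = s3
    generalize anyStart (c :: r) ["culture", "tradition", "custom"] = s4
    generalize anyIn r ["history", "origin", "background"] = g0
    generalize anyIn r ["preparation", "cooking", "recipe"] = g1
    generalize anyIn r ["ingredient", "component"] = g2
    generalize anyIn r ["variation", "type", "style"] = g3
    generalize anyIn r ["culture", "tradition", "custom"] = g4
    revert s0 s1 s2 s3 s4 g0 g1 g2 g3 g4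
    decide

-- ===== VERDICT (by name: the statement is the Claim_ definition above) =====
theorem determine_subcategory_spec : Claim_equal_determine_subcategory := by
  intro s _
  unfold Spec_determine_subcategory determine_subcategory determine_subcategory_alt
  rw [scanAll_eq, bestAll_eq]
  have hl : ∀ w : String, PySem.Str.isIn w (PySem.Str.lower s)
      = inKw w (PySem.Chars.lower s.toList) := by
    intro w; simp [PySem.Str.isIn, inKw, PySem.Str.toList_lower]
  simp only [List.any_cons, List.any_nil, Bool.or_false, hl]
  unfold chainVal anyIn
  simp only [List.any_cons, List.any_nil, Bool.or_false]
  generalize (inKw "history" (PySem.Chars.lower s.toList) ||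
      (inKw "origin" (PySem.Chars.lower s.toList) ||
      inKw "background" (PySem.Chars.lower s.toList))) = g0
  generalize (inKw "preparation" (PySem.Chars.lower s.toList) ||
      (inKw "cooking" (PySem.Chars.lower s.toList) ||
      inKw "recipe" (PySem.Chars.lower s.toList))) = g1
  generalize (inKw "ingredient" (PySem.Chars.lower s.toList) ||
      inKw "component" (PySem.Chars.lower s.toList)) = g2
  generalize (inKw "variation" (PySem.Chars.lower s.toList) ||
      (inKw "type" (PySem.Chars.lower s.toList) ||
      inKw "style" (PySem.Chars.lower s.toList))) = g3
  generalize (inKw "culture" (PySem.Chars.lower s.toList) ||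
      (inKw "tradition" (PySem.Chars.lower s.toList) ||
      inKw "custom" (PySem.Chars.lower s.toList))) = g4
  revert g0 g1 g2 g3 g4
  decide
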